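-- pv_equiv track=rewrite | github.com/sethdford/pocket-voice | scripts/normalize_text.py | normalize_email
-- ===== SOURCE A (Python) =====
-- def normalize_email(text: str) -> str:
--     """Normalize email: expand @ to 'at', . to 'dot'."""
--     if "@" not in text:
--         return text
--     local, _, domain = text.partition("@")
--     parts = []
--     for s, sep in [(local, " at "), (domain, "")]:
--         for c in s:
--             if c == ".":
--                 parts.append(" dot ")
--             elif c == "-":
--                 parts.append(" dash ")
--             elif c == "_":
--                 parts.append(" underscore ")
--             elif c == "+":
--                 parts.append(" plus ")
--             else:
--                 parts.append(c)
--         parts.append(sep)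
--     return "".join(parts).rstrip()
-- ===== SOURCE B (Python) =====
-- def _expand(s: str) -> str:
--     return (s.replace(".", " dot ")
--              .replace("-", " dash ")
--              .replace("_", " underscore ")
--              .replace("+", " plus "))
--
--
-- def normalize_email(text: str) -> str:
--     if "@" not in text:
--         return text
--     local, _, domain = text.partition("@")
--     return (_expand(local) + " at " + _expand(domain)).rstrip()
-- ===== Notes on version B (the rewrite author's own statement) =====
-- stated objective: simpler
-- what changed: A's single char-by-char loop with an if/elif chain appending pieces to a parts list is replaced by partitioning at the first at-sign and applying four whole-string replace passes to each side, joined with the spoken separator and right-stripped.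
import Mathlib
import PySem

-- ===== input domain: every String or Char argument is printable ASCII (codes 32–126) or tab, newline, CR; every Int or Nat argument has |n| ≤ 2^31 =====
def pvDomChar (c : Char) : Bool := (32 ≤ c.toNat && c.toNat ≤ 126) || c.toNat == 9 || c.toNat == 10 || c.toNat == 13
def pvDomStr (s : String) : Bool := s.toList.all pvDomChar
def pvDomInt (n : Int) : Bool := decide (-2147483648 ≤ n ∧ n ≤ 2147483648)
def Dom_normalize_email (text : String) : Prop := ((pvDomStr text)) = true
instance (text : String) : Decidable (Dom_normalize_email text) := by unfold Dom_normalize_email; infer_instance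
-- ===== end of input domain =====

-- B replaces A's single char-by-char branching loop with a partition plus chained
-- whole-string replace passes (simpler); return values proved equal on all inputs.


-- ===== PORT A =====
-- hand port of str.partition("@"): split at the FIRST '@' (exact for a one-char
-- separator; both Pythons call partition, so both ports share it)
def pvPartitionAt (s : List Char) : List Char × List Char :=
  (s.takeWhile (· ≠ '@'), (s.dropWhile (· ≠ '@')).drop 1)

-- the body of A's inner if/elif chain: the piece appended for one character
def pvPieceA (c : Char) : List Char :=
  if c = '.' then " dot ".toList
  else if c = '-' then " dash ".toList
  else if c = '_' then " underscore ".toList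
  else if c = '+' then " plus ".toList
  else [c]

def normalize_email (text : String) : String :=
  if PySem.Str.isIn "@" text = false then text
  else
    let p := pvPartitionAt text.toList
    let parts : List (List Char) :=
      [(p.1, " at ".toList), (p.2, ([] : List Char))].foldl
        (fun parts sv =>
          (sv.1.foldl (fun parts c => parts ++ [pvPieceA c]) parts) ++ [sv.2])
        []
    String.ofList (PySem.Chars.rstrip (PySem.Chars.join [] parts))

-- ===== PORT B =====
def pvExpandB (s : List Char) : List Char :=
  PySem.Chars.replace
    (PySem.Chars.replace
      (PySem.Chars.replace
        (PySem.Chars.replace s ".".toList " dot ".toList)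
        "-".toList " dash ".toList)
      "_".toList " underscore ".toList)
    "+".toList " plus ".toList

def normalize_email_alt (text : String) : String :=
  if PySem.Str.isIn "@" text = false then text
  else
    let p := pvPartitionAt text.toList
    String.ofList
      (PySem.Chars.rstrip (pvExpandB p.1 ++ " at ".toList ++ pvExpandB p.2))

-- ===== PRECONDITION & SPEC =====
def Spec_normalize_email (text : String) (out : String) : Prop := out = normalize_email_alt text
instance (text : String) (out : String) : Decidable (Spec_normalize_email text out) := by unfold Spec_normalize_email; infer_instance

-- ===== CLAIM (what is proved, stated in full; the proofs are below) =====
def Claim_equal_normalize_email : Prop := ∀ (text : String), Dom_normalize_email text → Spec_normalize_email text (normalize_email text)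

-- ===== LEMMAS AND PROOFS =====

lemma pv_replace_go_single (a : Char) (new : List Char) :
    ∀ (l acc : List Char) (fuel : Nat), l.length ≤ fuel →
      PySem.Chars.replace.go [a] new fuel l acc
        = acc.reverse ++ l.flatMap (fun c => if c = a then new else [c]) := by
  intro l
  induction l with
  | nil =>
      intro acc fuel _
      cases fuel <;> simp [PySem.Chars.replace.go]
  | cons c t ih =>
      intro acc fuel hfuel
      cases fuel with
      | zero => simp at hfuel
      | succ n =>
          rw [PySem.Chars.replace.go]
          by_cases h : c = a
          · subst h
            simp only [List.isPrefixOf, beq_self_eq_true, Bool.true_and, if_pos]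
            show PySem.Chars.replace.go [c] new n (List.drop 1 (c :: t)) (new.reverse ++ acc) = _
            simp only [List.drop_succ_cons, List.drop_zero]
            rw [ih _ n (by simpa using hfuel)]
            simp
          · have hp : [a].isPrefixOf (c :: t) = false := by
              simp [List.isPrefixOf]; exact fun hh => (h hh.symm).elim
            simp only [hp, if_neg, Bool.false_eq_true, not_false_iff]
            rw [ih _ n (by simpa using hfuel)]
            simp [h]

lemma pv_replace_single (s : List Char) (a : Char) (new : List Char) :
    PySem.Chars.replace s [a] new = s.flatMap (fun c => if c = a then new else [c]) := by
  rw [PySem.Chars.replace]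
  simp only [List.isEmpty_cons, Bool.false_eq_true, if_neg, not_false_iff]
  simpa using pv_replace_go_single a new s [] s.length le_rfl

lemma pv_flatMap_flatMap {α : Type} (l : List α) (f g : α → List α) :
    (l.flatMap f).flatMap g = l.flatMap (fun x => (f x).flatMap g) := by
  induction l with
  | nil => simp
  | cons a t ih => simp [ih]

lemma pv_expandB_eq (s : List Char) : pvExpandB s = s.flatMap pvPieceA := by
  unfold pvExpandB
  rw [show (".".toList) = ['.'] from rfl, show ("-".toList) = ['-'] from rfl,
      show ("_".toList) = ['_'] from rfl, show ("+".toList) = ['+'] from rfl]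
  rw [pv_replace_single, pv_replace_single, pv_replace_single, pv_replace_single,
      pv_flatMap_flatMap, pv_flatMap_flatMap, pv_flatMap_flatMap]
  congr 1
  funext c
  by_cases h1 : c = '.'
  · subst h1; decide
  · by_cases h2 : c = '-'
    · subst h2; decide
    · by_cases h3 : c = '_'
      · subst h3; decide
      · by_cases h4 : c = '+'
        · subst h4; decide
        · simp [pvPieceA, h1, h2, h3, h4]

lemma pv_foldl_append_map (f : Char → List Char) :
    ∀ (cs : List Char) (init : List (List Char)),
      cs.foldl (fun p c => p ++ [f c]) init = init ++ cs.map f := by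
  intro cs
  induction cs with
  | nil => intro init; simp
  | cons c t ih => intro init; simp [ih]

lemma pv_join_nil (parts : List (List Char)) :
    PySem.Chars.join [] parts = parts.flatten := by
  simp [PySem.Chars.join, List.intercalate]
  induction parts with
  | nil => rfl
  | cons a t ih => cases t <;> simp_all [List.intersperse]

lemma pv_core (p1 p2 : List Char) :
    PySem.Chars.join []
      ([(p1, " at ".toList), (p2, ([] : List Char))].foldl
        (fun parts sv =>
          (sv.1.foldl (fun parts c => parts ++ [pvPieceA c]) parts) ++ [sv.2])
        [])
      = pvExpandB p1 ++ " at ".toList ++ pvExpandB p2 := by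
  simp only [List.foldl_cons, List.foldl_nil]
  rw [pv_foldl_append_map, pv_foldl_append_map, pv_join_nil]
  simp [pv_expandB_eq, List.flatMap]

-- ===== VERDICT (by name: the statement is the Claim_ definition above) =====
theorem normalize_email_spec : Claim_equal_normalize_email := by
  intro text _
  unfold Spec_normalize_email normalize_email normalize_email_alt
  by_cases h : PySem.Str.isIn "@" text = false
  · rw [if_pos h, if_pos h]
  · rw [if_neg h, if_neg h]
    exact congrArg String.ofList (congrArg PySem.Chars.rstrip (pv_core _ _))
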